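-- pv_equiv track=rewrite | github.com/millstar324/2026-CT_Study | [DAY2] LV1_바탕화면_정리/바탕화면_정리_송채원.py | find_re
-- ===== SOURCE A (Python) =====
-- def find_re(w,r,c,ls):
--     re = ls
--     for i in w:
--         for j,v in reversed(list(enumerate(list(i)))):
--             if v=='#' and (j > re):
--                 re = j
--                 break
--
--     return re
-- ===== SOURCE B (Python) =====
-- def find_re(w, r, c, ls):
--     # Column-major search: scan columns from the widest row's last column
--     # downward and return the first (highest) column holding a '#'.
--     m = max((len(row) for row in w), default=0)
--     j = m - 1
--     while j > ls and j >= 0: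
--         if any(len(row) > j and row[j] == '#' for row in w):
--             return j
--         j -= 1
--     return ls
-- ===== Notes on version B (the rewrite author's own statement) =====
-- stated objective: alternative
-- what changed: Replaces A's row-major reversed scan with running threshold and per-row break by a column-major search: compute the maximum row length and scan columns from the highest downward, returning the first column containing '#'.
import Mathlib
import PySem

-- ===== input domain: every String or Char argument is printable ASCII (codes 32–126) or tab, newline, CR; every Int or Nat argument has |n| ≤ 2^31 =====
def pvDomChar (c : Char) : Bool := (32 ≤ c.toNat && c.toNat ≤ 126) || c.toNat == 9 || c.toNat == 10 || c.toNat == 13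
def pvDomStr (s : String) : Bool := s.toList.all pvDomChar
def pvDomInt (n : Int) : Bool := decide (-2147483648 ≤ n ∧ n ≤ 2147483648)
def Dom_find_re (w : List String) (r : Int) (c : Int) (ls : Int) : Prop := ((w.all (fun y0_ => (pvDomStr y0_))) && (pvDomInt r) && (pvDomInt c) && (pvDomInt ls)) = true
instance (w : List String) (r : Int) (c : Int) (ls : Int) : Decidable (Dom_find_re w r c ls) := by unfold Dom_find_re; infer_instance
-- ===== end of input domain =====

-- B replaces A's row-major reversed scans by a column-major highest-column-first search (alternative decomposition, same result).

-- ===== PORT A =====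
-- inner loop: 'for j,v in reversed(list(enumerate(list(i)))): if v=='#' and j>re: re=j; break'
def findReInner (re : Int) : List (Int × Char) → Int
  | [] => re
  | (j, v) :: rest => if v = '#' ∧ j > re then j else findReInner re rest

def find_re (w : List String) (r : Int) (c : Int) (ls : Int) : Int :=
  w.foldl (fun re i => findReInner re (PySem.List.enumerate i.toList 0).reverse) ls

-- ===== PORT B =====
-- 'any(len(row) > j and row[j] == '#' for row in w)'
def hashAtCol (w : List String) (j : Int) : Bool :=
  w.any (fun row => decide (PySem.Str.len row > j) && (PySem.Str.pyGet? row j == some '#'))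

-- the while loop 'while j > ls and j >= 0: …; j -= 1'
def findReLoop (w : List String) (ls : Int) (j : Int) : Int :=
  if j > ls ∧ j ≥ 0 then
    if hashAtCol w j then j else findReLoop w ls (j - 1)
  else ls
termination_by (j + 1).toNat
decreasing_by omega

-- 'm = max((len(row) for row in w), default=0)' : exact, since lengths are nonnegative the
-- fold with base 0 equals Python's max-with-default-0.
def find_re_alt (w : List String) (r : Int) (c : Int) (ls : Int) : Int :=
  findReLoop w ls ((w.foldl (fun m row => max m (PySem.Str.len row)) 0) - 1)

-- ===== PRECONDITION & SPEC =====
def Spec_find_re (w : List String) (r : Int) (c : Int) (ls : Int) (out : Int) : Prop := out = find_re_alt w r c ls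
instance (w : List String) (r : Int) (c : Int) (ls : Int) (out : Int) : Decidable (Spec_find_re w r c ls out) := by unfold Spec_find_re; infer_instance

-- ===== CLAIM (what is proved, stated in full; the proofs are below) =====
def Claim_equal_find_re : Prop := ∀ (w : List String) (r : Int) (c : Int) (ls : Int), Dom_find_re w r c ls → Spec_find_re w r c ls (find_re w r c ls)

-- ===== LEMMAS AND PROOFS =====

-- the '#' columns of a row / of the whole grid
def rowCols (l : List Char) : List Int :=
  (PySem.List.enumerate l 0).filterMap (fun p => if p.2 = '#' then some p.1 else none)

def allCols (w : List String) : List Int := w.flatMap (fun row => rowCols row.toList)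

-- F a l = max of a and the elements of l
def Fm (a : Int) (l : List Int) : Int := l.foldl max a

theorem le_Fm (a : Int) (l : List Int) : a ≤ Fm a l := by
  induction l generalizing a with
  | nil => simp [Fm]
  | cons x xs ih => exact le_trans (le_max_left a x) (ih _)

theorem mem_le_Fm {k : Int} {l : List Int} (a : Int) (h : k ∈ l) : k ≤ Fm a l := by
  induction l generalizing a with
  | nil => simp at h
  | cons x xs ih =>
    rcases List.mem_cons.mp h with h | h
    · subst h; exact le_trans (le_max_right a k) (le_Fm _ _)
    · exact ih _ h

theorem Fm_le {a c : Int} {l : List Int} (ha : a ≤ c) (hl : ∀ k ∈ l, k ≤ c) : Fm a l ≤ c := by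
  induction l generalizing a with
  | nil => simpa [Fm] using ha
  | cons x xs ih =>
    exact ih (max_le ha (hl x (List.mem_cons_self))) (fun k hk => hl k (List.mem_cons_of_mem _ hk))

theorem Fm_eq_self {a : Int} {l : List Int} (h : ∀ k ∈ l, k ≤ a) : Fm a l = a :=
  le_antisymm (Fm_le le_rfl h) (le_Fm a l)

theorem Fm_perm {l l' : List Int} (a : Int) (h : l.Perm l') : Fm a l = Fm a l' := by
  induction h generalizing a with
  | nil => rfl
  | cons x _ ih => exact ih (max a x)
  | swap x y l =>
    show List.foldl max (max (max a y) x) l = List.foldl max (max (max a x) y) l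
    rw [max_right_comm]
  | trans _ _ ih1 ih2 => exact (ih1 a).trans (ih2 a)

theorem Fm_append (a : Int) (l1 l2 : List Int) : Fm a (l1 ++ l2) = Fm (Fm a l1) l2 :=
  List.foldl_append

-- A's inner loop on a fst-strictly-decreasing list is the max over its '#' columns
theorem str_pyGet?_of_nonneg (s : String) (j : Int) (hj : 0 ≤ j) :
    PySem.Str.pyGet? s j = s.toList[j.toNat]? := by
  have hj' : ((j.toNat : Int)) = j := Int.toNat_of_nonneg hj
  rw [← hj', PySem.Str.pyGet?_natCast, Int.toNat_natCast]

-- A's inner loop on a fst-strictly-decreasing list is the max over its '#' columns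
theorem findReInner_eq (l : List (Int × Char)) (re : Int)
    (hs : l.Pairwise (fun p q => q.1 < p.1)) :
    findReInner re l = Fm re (l.filterMap (fun p => if p.2 = '#' then some p.1 else none)) := by
  induction l generalizing re with
  | nil => simp [findReInner, Fm]
  | cons p rest ih =>
    obtain ⟨j, v⟩ := p
    have hrest : rest.Pairwise (fun p q => q.1 < p.1) := (List.pairwise_cons.mp hs).2
    have hlt : ∀ q ∈ rest, q.1 < j := fun q hq => (List.pairwise_cons.mp hs).1 q hq
    rw [findReInner]
    by_cases hv : v = '#'
    · subst hv
      have hfm : ((j, '#') :: rest).filterMap (fun p => if p.2 = '#' then some p.1 else none)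
          = j :: rest.filterMap (fun p => if p.2 = '#' then some p.1 else none) := by simp
      rw [hfm]
      by_cases hj : j > re
      · rw [if_pos ⟨rfl, hj⟩]
        have hstep : Fm re (j :: rest.filterMap (fun p => if p.2 = '#' then some p.1 else none))
            = Fm (max re j) (rest.filterMap (fun p => if p.2 = '#' then some p.1 else none)) := rfl
        rw [hstep, max_eq_right hj.le]
        refine (Fm_eq_self ?_).symm
        intro k hk
        obtain ⟨q, hq, hqk⟩ := List.mem_filterMap.mp hk
        have hk1 : k = q.1 := by by_cases h2 : q.2 = '#' <;> simp [h2] at hqk; omega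
        subst hk1
        exact le_of_lt (hlt q hq)
      · rw [if_neg (by tauto), ih _ hrest]
        have hstep : Fm re (j :: rest.filterMap (fun p => if p.2 = '#' then some p.1 else none))
            = Fm (max re j) (rest.filterMap (fun p => if p.2 = '#' then some p.1 else none)) := rfl
        rw [hstep, max_eq_left (by omega)]
    · have hfm : ((j, v) :: rest).filterMap (fun p => if p.2 = '#' then some p.1 else none)
          = rest.filterMap (fun p => if p.2 = '#' then some p.1 else none) := by simp [hv]
      rw [hfm, if_neg (by tauto), ih _ hrest]

theorem find_re_eq (w : List String) (r c ls : Int) : find_re w r c ls = Fm ls (allCols w) := by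
  show w.foldl _ ls = _
  induction w generalizing ls with
  | nil => simp [allCols, Fm]
  | cons row rest ih =>
    simp only [List.foldl_cons]
    rw [ih]
    have hs : ((PySem.List.enumerate row.toList 0).reverse).Pairwise (fun p q : Int × Char => q.1 < p.1) := by
      rw [List.pairwise_reverse]
      exact PySem.List.pairwise_lt_enumerate row.toList 0
    rw [findReInner_eq _ _ hs]
    have hperm : (((PySem.List.enumerate row.toList 0).reverse).filterMap
        (fun p => if p.2 = '#' then some p.1 else none)).Perm (rowCols row.toList) := by
      rw [List.filterMap_reverse]
      exact List.reverse_perm _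
    rw [Fm_perm _ hperm]
    show Fm (Fm ls (rowCols row.toList)) (allCols rest) = Fm ls (allCols (row :: rest))
    simp only [allCols, List.flatMap_cons]
    exact (Fm_append _ _ _).symm

-- membership in allCols
theorem mem_rowCols {l : List Char} {k : Int} :
    k ∈ rowCols l ↔ 0 ≤ k ∧ ∃ h : k.toNat < l.length, l[k.toNat] = '#' := by
  constructor
  · intro hk
    obtain ⟨p, hp, hpk⟩ := List.mem_filterMap.mp hk
    by_cases h2 : p.2 = '#'
    · rw [if_pos h2] at hpk
      obtain ⟨n, hn, hpe⟩ := (PySem.List.mem_enumerate_iff _ _ _).mp hp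
      have hk1 : k = p.1 := (Option.some.inj hpk).symm
      have h1 : p.1 = (n : Int) := by rw [hpe]; simp
      have h22 : p.2 = l[n] := by rw [hpe]
      subst hk1
      rw [h1]
      refine ⟨Int.natCast_nonneg n, ?_⟩
      rw [Int.toNat_natCast]
      exact ⟨hn, by rw [← h22]; exact h2⟩
    · simp [h2] at hpk
  · rintro ⟨hk0, hlt, hget⟩
    refine List.mem_filterMap.mpr ⟨(k, l[k.toNat]), ?_, by simp [hget]⟩
    refine (PySem.List.mem_enumerate_iff _ _ _).mpr ⟨k.toNat, hlt, ?_⟩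
    simp [Int.toNat_of_nonneg hk0]

theorem mem_allCols {w : List String} {k : Int} :
    k ∈ allCols w ↔ ∃ row ∈ w, k ∈ rowCols row.toList := by
  simp [allCols]

-- the column test of B detects exactly the columns of allCols (for nonnegative j)
theorem hashAtCol_iff {w : List String} {j : Int} (hj : 0 ≤ j) :
    hashAtCol w j = true ↔ j ∈ allCols w := by
  rw [hashAtCol, List.any_eq_true, mem_allCols]
  constructor
  · rintro ⟨row, hrow, hb⟩
    rw [Bool.and_eq_true, beq_iff_eq] at hb
    obtain ⟨hlen, hget⟩ := hb
    refine ⟨row, hrow, ?_⟩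
    rw [str_pyGet?_of_nonneg _ _ hj] at hget
    obtain ⟨hlt, hv⟩ := List.getElem?_eq_some_iff.mp hget
    exact mem_rowCols.mpr ⟨hj, hlt, hv⟩
  · rintro ⟨row, hrow, hk⟩
    obtain ⟨_, hlt, hget⟩ := mem_rowCols.mp hk
    refine ⟨row, hrow, ?_⟩
    rw [Bool.and_eq_true, beq_iff_eq]
    constructor
    · simp only [PySem.Str.len_eq, decide_eq_true_eq]
      omega
    · rw [str_pyGet?_of_nonneg _ _ hj, List.getElem?_eq_some_iff]
      exact ⟨hlt, hget⟩

theorem init_le_foldl_max (l : List String) (a : Int) :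
    a ≤ l.foldl (fun m r => max m (PySem.Str.len r)) a := by
  induction l generalizing a with
  | nil => simp
  | cons y ys ih => exact le_trans (le_max_left _ _) (ih _)

theorem len_le_foldl_max {l : List String} {row : String} (a : Int) (h : row ∈ l) :
    PySem.Str.len row ≤ l.foldl (fun m r => max m (PySem.Str.len r)) a := by
  induction l generalizing a with
  | nil => simp at h
  | cons x xs ih =>
    simp only [List.foldl_cons]
    rcases List.mem_cons.mp h with h | h
    · subst h; exact le_trans (le_max_right a _) (init_le_foldl_max xs _)
    · exact ih _ h

theorem allCols_bounds {w : List String} {k : Int} (hk : k ∈ allCols w) :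
    0 ≤ k ∧ k < w.foldl (fun m row => max m (PySem.Str.len row)) 0 := by
  obtain ⟨row, hrow, hkr⟩ := mem_allCols.mp hk
  obtain ⟨hk0, hlt, -⟩ := mem_rowCols.mp hkr
  refine ⟨hk0, ?_⟩
  have hlen : k < PySem.Str.len row := by
    simp only [PySem.Str.len_eq]; omega
  have hle := len_le_foldl_max (l := w) 0 hrow
  omega

-- B's loop computes the max of ls and the grid columns ≤ j
theorem findReLoop_eq (w : List String) (ls j : Int) :
    findReLoop w ls j = Fm ls ((allCols w).filter (fun k => decide (k ≤ j))) := by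
  induction j using findReLoop.induct w ls with
  | case1 j hcond hhash =>
    rw [findReLoop, if_pos hcond, if_pos hhash]
    have hj0 : (0 : Int) ≤ j := hcond.2
    have hmem : j ∈ (allCols w).filter (fun k => decide (k ≤ j)) :=
      List.mem_filter.mpr ⟨(hashAtCol_iff hj0).mp hhash, by simp⟩
    refine le_antisymm (mem_le_Fm _ hmem) (Fm_le (le_of_lt hcond.1) ?_)
    intro k hk
    exact of_decide_eq_true (List.mem_filter.mp hk).2
  | case2 j hcond hhash ih =>
    rw [findReLoop, if_pos hcond, if_neg hhash]
    rw [ih]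
    congr 1
    apply List.filter_congr
    intro k hk
    have hb := allCols_bounds hk
    have hkj : k ≠ j := by
      intro h; subst h
      exact hhash ((hashAtCol_iff hb.1).mpr hk)
    simp only [decide_eq_decide]
    omega
  | case3 j hcond =>
    rw [findReLoop, if_neg hcond]
    refine (Fm_eq_self ?_).symm
    intro k hk
    have hb := allCols_bounds (List.mem_filter.mp hk).1
    have hkj : k ≤ j := of_decide_eq_true (List.mem_filter.mp hk).2
    omega

theorem find_re_alt_eq (w : List String) (r c ls : Int) : find_re_alt w r c ls = Fm ls (allCols w) := by
  rw [find_re_alt, findReLoop_eq]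
  congr 1
  apply List.filter_eq_self.mpr
  intro k hk
  have hb := allCols_bounds hk
  simp only [decide_eq_true_eq]
  omega

-- ===== VERDICT (by name: the statement is the Claim_ definition above) =====
theorem find_re_spec : Claim_equal_find_re := by
  intro w r c ls _
  unfold Spec_find_re
  rw [find_re_eq, find_re_alt_eq]
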